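-- pv_equiv track=rewrite | github.com/72rs3/pharmacy-assistant | backend/app/ai/rag_service.py | _risk_escalate
-- ===== SOURCE A (Python) =====
-- def _risk_escalate(message: str) -> bool:
--     msg = message.lower()
--     return any(
--         token in msg
--         for token in [
--             "chest pain",
--             "shortness of breath",
--             "seizure",
--             "unconscious",
--             "bleeding",
--             "pregnant",
--             "overdose",
--             "anaphylaxis",
--             "suicidal",
--         ]
--     )
-- ===== SOURCE B (Python) =====
-- _EMERGENCY_KEYWORDS = (
--     "chest pain",
--     "shortness of breath",
--     "seizure",
--     "unconscious",
--     "bleeding",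
--     "pregnant",
--     "overdose",
--     "anaphylaxis",
--     "suicidal",
-- )
--
--
-- def _risk_escalate(message: str) -> bool:
--     # Single left-to-right scan: at each position of the lowercased message,
--     # test whether some keyword starts there (anchored prefix test),
--     # instead of running one full substring search per keyword.
--     msg = message.lower()
--     for i in range(len(msg) + 1):
--         for kw in _EMERGENCY_KEYWORDS:
--             if msg.startswith(kw, i):
--                 return True
--     return False
-- ===== Notes on version B (the rewrite author's own statement) =====
-- stated objective: alternative
-- what changed: Replaced k independent full substring searches (one 'token in msg' scan per keyword) by a single left-to-right scan over positions of the lowercased message with an anchored prefix test per keyword at each position.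
import Mathlib
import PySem

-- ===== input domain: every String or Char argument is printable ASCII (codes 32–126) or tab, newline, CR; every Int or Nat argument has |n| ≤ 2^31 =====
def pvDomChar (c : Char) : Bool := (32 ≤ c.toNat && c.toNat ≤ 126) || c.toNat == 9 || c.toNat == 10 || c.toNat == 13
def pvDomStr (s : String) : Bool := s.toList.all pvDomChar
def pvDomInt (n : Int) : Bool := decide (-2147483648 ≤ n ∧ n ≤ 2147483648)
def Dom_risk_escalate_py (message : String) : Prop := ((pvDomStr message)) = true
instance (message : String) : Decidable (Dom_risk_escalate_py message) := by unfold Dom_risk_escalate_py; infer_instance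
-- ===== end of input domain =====

-- B replaces one full substring search per keyword by a single positional scan
-- of the lowercased message with anchored prefix tests (objective: alternative).

-- ===== PORT A =====
def risk_escalate_py (message : String) : Bool :=
  let msg := PySem.Str.lower message
  (["chest pain", "shortness of breath", "seizure", "unconscious", "bleeding",
    "pregnant", "overdose", "anaphylaxis", "suicidal"] : List String).any
    (fun token => PySem.Str.isIn token msg)

-- ===== PORT B =====
def pvEmergencyKeywords : List String :=
  ["chest pain", "shortness of breath", "seizure", "unconscious", "bleeding",
   "pregnant", "overdose", "anaphylaxis", "suicidal"]

def risk_escalate_py_alt (message : String) : Bool :=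
  let msg := (PySem.Str.lower message).toList
  -- msg.startswith(kw, i) with 0 ≤ i ≤ len(msg) is exactly a prefix test on msg.drop i
  (List.range (msg.length + 1)).any
    (fun i => pvEmergencyKeywords.any
      (fun kw => PySem.Chars.startswith (msg.drop i) kw.toList))

-- ===== PRECONDITION & SPEC =====
def Spec_risk_escalate_py (message : String) (out : Bool) : Prop := out = risk_escalate_py_alt message
instance (message : String) (out : Bool) : Decidable (Spec_risk_escalate_py message out) := by unfold Spec_risk_escalate_py; infer_instance

-- ===== CLAIM (what is proved, stated in full; the proofs are below) =====
def Claim_equal_risk_escalate_py : Prop := ∀ (message : String), Dom_risk_escalate_py message → Spec_risk_escalate_py message (risk_escalate_py message)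

-- ===== LEMMAS AND PROOFS =====

-- A keyword occurs as a substring iff it is a prefix at some position ≤ length.
theorem pv_scan_eq (cs : List Char) (ks : List String) :
    (List.range (cs.length + 1)).any
        (fun i => ks.any (fun kw => PySem.Chars.startswith (cs.drop i) kw.toList))
      = ks.any (fun kw => PySem.Chars.isIn kw.toList cs) := by
  rw [Bool.eq_iff_iff]
  simp only [List.any_eq_true, List.mem_range, PySem.Chars.startswith,
    List.isPrefixOf_iff_prefix, PySem.Chars.isIn_iff_infix]
  constructor
  · rintro ⟨i, _, kw, hkw, hpre⟩
    exact ⟨kw, hkw, hpre.isInfix.trans (List.drop_suffix i cs).isInfix⟩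
  · rintro ⟨kw, hkw, hinf⟩
    obtain ⟨s, t, rfl⟩ := hinf
    refine ⟨s.length, by simp, kw, hkw, ?_⟩
    simp [List.drop_left']

theorem risk_escalate_eq (message : String) :
    risk_escalate_py message = risk_escalate_py_alt message := by
  unfold risk_escalate_py risk_escalate_py_alt pvEmergencyKeywords
  rw [pv_scan_eq]
  simp [PySem.Str.isIn]

-- ===== VERDICT (by name: the statement is the Claim_ definition above) =====
theorem risk_escalate_py_spec : Claim_equal_risk_escalate_py := by
  intro message _
  exact risk_escalate_eq message
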